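-- pv_equiv track=rewrite | github.com/AlexGimeno3/Gimeno_et_al_code | code/processing_scripts/processing_scripts/5_run_stats/PDF_fxns.py | sort_by_categories
-- ===== SOURCE A (Python) =====
-- def sort_by_categories(df_list):
--     # Extract headers and rows
--     headers = df_list[0]
--     rows = df_list[1:]
--     # Find the column index for variable name (assuming it's called 'Variable' or similar)
--     var_idx = next((i for i, col in enumerate(headers) if 'variable' in col.lower()), 0)
--     p_idx = next((i for i, col in enumerate(headers) if 'test results' in col.lower()), -1)
--     # Define categories
--     categories = {
--         'delta': [],
--         'theta': [],
--         'alpha': [],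
--         'beta': [],
--         'other': []
--     }
--     # Categorize rows
--     for row in rows:
--         var_name = str(row[var_idx]).lower()
--         if 'delta' in var_name:
--             categories['delta'].append(row)
--         elif 'theta' in var_name:
--             categories['theta'].append(row)
--         elif 'alpha' in var_name:
--             categories['alpha'].append(row)
--         elif 'beta' in var_name:
--             categories['beta'].append(row)
--         else:
--             categories['other'].append(row)
--     # Sort each category alphabetically by variable name
--     # for category in categories:
--     #     categories[category].sort(key=lambda x: str(x[var_idx]))
--     # Combine all sorted categories
--     sorted_rows = []
--     for category in ['delta', 'theta', 'alpha', 'beta', 'other']: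
--         sorted_rows.extend(categories[category])
--     return headers, sorted_rows, p_idx
-- ===== SOURCE B (Python) =====
-- def sort_by_categories(df_list):
--     headers = df_list[0]
--     rows = df_list[1:]
--     var_idx = next((i for i, col in enumerate(headers) if 'variable' in col.lower()), 0)
--     p_idx = next((i for i, col in enumerate(headers) if 'test results' in col.lower()), -1)
--     bands = ['delta', 'theta', 'alpha', 'beta']
--
--     def priority(row):
--         name = str(row[var_idx]).lower()
--         return next((k for k, band in enumerate(bands) if band in name), 4)
--
--     # One stable sort by band priority replaces the five explicit buckets:
--     # stability keeps the original order inside each band, so the result is identical.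
--     return headers, sorted(rows, key=priority), p_idx
-- ===== Notes on version B (the rewrite author's own statement) =====
-- stated objective: idiomatic
-- what changed: Replaces the explicit five-bucket partition-and-concatenate with a single stable sort of the rows by a 0-4 band-priority key, relying on sort stability to preserve within-band order.
import Mathlib
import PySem

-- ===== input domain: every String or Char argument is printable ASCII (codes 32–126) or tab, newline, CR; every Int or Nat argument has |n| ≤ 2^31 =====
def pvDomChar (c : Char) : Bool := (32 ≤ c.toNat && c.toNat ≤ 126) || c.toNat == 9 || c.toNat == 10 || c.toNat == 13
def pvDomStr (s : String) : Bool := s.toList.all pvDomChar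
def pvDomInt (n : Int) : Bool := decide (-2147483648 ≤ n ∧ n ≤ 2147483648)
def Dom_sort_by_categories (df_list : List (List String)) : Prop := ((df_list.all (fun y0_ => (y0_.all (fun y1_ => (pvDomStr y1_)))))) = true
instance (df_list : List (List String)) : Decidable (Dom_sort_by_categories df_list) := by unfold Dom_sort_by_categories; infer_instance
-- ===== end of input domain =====

-- B replaces A's five explicit category buckets + concatenation with one stable sort
-- of the rows by a 0-4 band-priority key (idiomatic; same result by sort stability).


-- ===== PORT A =====
-- the body of A's categorizing for-loop (the dict of five fixed keys is a 5-tuple of lists: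
-- delta, theta, alpha, beta, other)
def pvStepA (var_idx : Int)
    (c : List (List String) × List (List String) × List (List String) × List (List String) × List (List String))
    (row : List String) :
    List (List String) × List (List String) × List (List String) × List (List String) × List (List String) :=
  let var_name := PySem.Str.lower ((PySem.List.pyGet? row var_idx).getD "")   -- row[var_idx] (raises if row too short; Pre_ excludes)
  if PySem.Str.isIn "delta" var_name then (c.1 ++ [row], c.2.1, c.2.2.1, c.2.2.2.1, c.2.2.2.2)
  else if PySem.Str.isIn "theta" var_name then (c.1, c.2.1 ++ [row], c.2.2.1, c.2.2.2.1, c.2.2.2.2)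
  else if PySem.Str.isIn "alpha" var_name then (c.1, c.2.1, c.2.2.1 ++ [row], c.2.2.2.1, c.2.2.2.2)
  else if PySem.Str.isIn "beta" var_name then (c.1, c.2.1, c.2.2.1, c.2.2.2.1 ++ [row], c.2.2.2.2)
  else (c.1, c.2.1, c.2.2.1, c.2.2.2.1, c.2.2.2.2 ++ [row])

def sort_by_categories (df_list : List (List String)) : List String × List (List String) × Int :=
  let headers := (PySem.List.pyGet? df_list 0).getD []            -- df_list[0] (raises on []; Pre_ excludes)
  let rows := PySem.List.slice df_list (some 1) none              -- df_list[1:]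
  let var_idx : Int :=
    (((PySem.List.enumerate headers 0).find?
        (fun p => PySem.Str.isIn "variable" (PySem.Str.lower p.2))).map (·.1)).getD 0
  let p_idx : Int :=
    (((PySem.List.enumerate headers 0).find?
        (fun p => PySem.Str.isIn "test results" (PySem.Str.lower p.2))).map (·.1)).getD (-1)
  let cats := rows.foldl (pvStepA var_idx) ([], [], [], [], [])
  let sorted_rows := cats.1 ++ cats.2.1 ++ cats.2.2.1 ++ cats.2.2.2.1 ++ cats.2.2.2.2
  (headers, sorted_rows, p_idx)

-- ===== PORT B =====
def sort_by_categories_alt (df_list : List (List String)) : List String × List (List String) × Int :=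
  let headers := (PySem.List.pyGet? df_list 0).getD []
  let rows := PySem.List.slice df_list (some 1) none
  let var_idx : Int :=
    (((PySem.List.enumerate headers 0).find?
        (fun p => PySem.Str.isIn "variable" (PySem.Str.lower p.2))).map (·.1)).getD 0
  let p_idx : Int :=
    (((PySem.List.enumerate headers 0).find?
        (fun p => PySem.Str.isIn "test results" (PySem.Str.lower p.2))).map (·.1)).getD (-1)
  let priority : List String → Int := fun row =>
    let name := PySem.Str.lower ((PySem.List.pyGet? row var_idx).getD "")
    (((PySem.List.enumerate ["delta", "theta", "alpha", "beta"] 0).find?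
        (fun p => PySem.Str.isIn p.2 name)).map (·.1)).getD 4
  (headers, PySem.List.sorted rows priority, p_idx)

-- ===== PRECONDITION & SPEC =====
-- the column index A reads from each data row: first header containing 'variable', else 0
def pvVarIdx (headers : List String) : Nat :=
  (headers.findIdx? (fun col => PySem.Str.isIn "variable" (PySem.Str.lower col))).getD 0

-- Pre_ excludes exactly the inputs on which the Python A raises IndexError (and returns nothing):
-- an empty df_list (df_list[0]) and data rows not longer than the variable-column index (row[var_idx]).
def Pre_sort_by_categories (df_list : List (List String)) : Prop :=
  df_list ≠ [] ∧ ∀ row ∈ df_list.tail, pvVarIdx (df_list.headD []) < row.length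
instance (df_list : List (List String)) : Decidable (Pre_sort_by_categories df_list) := by
  unfold Pre_sort_by_categories; infer_instance

def pvWitness_sort_by_categories : List (List String) :=
  [["Variable", "Test results"], ["beta power", "p=0.3"], ["delta power", "p=0.01"]]

def Spec_sort_by_categories (df_list : List (List String)) (out : List String × List (List String) × Int) : Prop := out = sort_by_categories_alt df_list
instance (df_list : List (List String)) (out : List String × List (List String) × Int) : Decidable (Spec_sort_by_categories df_list out) := by unfold Spec_sort_by_categories; infer_instance

-- ===== CLAIM (what is proved, stated in full; the proofs are below) =====
def Claim_equal_sort_by_categories : Prop := ∀ (df_list : List (List String)), Dom_sort_by_categories df_list → Pre_sort_by_categories df_list → Spec_sort_by_categories df_list (sort_by_categories df_list)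

-- ===== LEMMAS AND PROOFS =====

-- the lowercased variable cell both programs test
def pvName (vi : Int) (row : List String) : String :=
  PySem.Str.lower ((PySem.List.pyGet? row vi).getD "")

-- the if/elif chain as an Int-valued key
def pvPrio (vi : Int) (row : List String) : Int :=
  if PySem.Str.isIn "delta" (pvName vi row) then 0
  else if PySem.Str.isIn "theta" (pvName vi row) then 1
  else if PySem.Str.isIn "alpha" (pvName vi row) then 2
  else if PySem.Str.isIn "beta" (pvName vi row) then 3
  else 4

lemma pvPrio_range (vi : Int) (row : List String) :
    pvPrio vi row = 0 ∨ pvPrio vi row = 1 ∨ pvPrio vi row = 2 ∨ pvPrio vi row = 3 ∨ pvPrio vi row = 4 := by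
  unfold pvPrio; split_ifs <;> simp

-- B's next(...)-over-enumerate priority is exactly the if/elif chain
lemma priorityB_eq (vi : Int) :
    (fun row => (((PySem.List.enumerate ["delta", "theta", "alpha", "beta"] 0).find?
        (fun p => PySem.Str.isIn p.2 (PySem.Str.lower ((PySem.List.pyGet? row vi).getD "")))).map (·.1)).getD 4)
      = pvPrio vi := by
  funext row
  simp only [PySem.List.enumerate, pvPrio, pvName]
  norm_num [List.find?]
  split_ifs <;> simp_all

def pvBuckets (key : List String → Int) (l : List (List String)) : List (List String) :=
  l.filter (fun x => key x == 0) ++ l.filter (fun x => key x == 1) ++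
  l.filter (fun x => key x == 2) ++ l.filter (fun x => key x == 3) ++
  l.filter (fun x => key x == 4)

lemma insertBy_append_not (before : List String → List String → Bool) (x : List String)
    (L M : List (List String)) (h : ∀ y ∈ L, before x y = false) :
    PySem.List.insertBy before x (L ++ M) = L ++ PySem.List.insertBy before x M := by
  induction L with
  | nil => simp
  | cons y ys ih =>
      simp only [List.cons_append, PySem.List.insertBy, h y (by simp)]
      simp only [Bool.false_eq_true, if_false, List.cons.injEq, true_and]
      exact ih (fun z hz => h z (by simp [hz]))

lemma insertBy_all_before (before : List String → List String → Bool) (x : List String)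
    (M : List (List String)) (h : ∀ y ∈ M, before x y = true) :
    PySem.List.insertBy before x M = x :: M := by
  cases M with
  | nil => simp [PySem.List.insertBy]
  | cons y ys => simp [PySem.List.insertBy, h y (by simp)]

lemma insert_split (before : List String → List String → Bool) (x : List String)
    (L M : List (List String)) (hL : ∀ y ∈ L, before x y = false)
    (hM : ∀ y ∈ M, before x y = true) :
    PySem.List.insertBy before x (L ++ M) = L ++ x :: M := by
  rw [insertBy_append_not before x L M hL, insertBy_all_before before x M hM]

lemma key_of_mem_filter (key : List String → Int) (l : List (List String)) (k : Int)
    (y : List String) (hy : y ∈ l.filter (fun x => key x == k)) : key y = k := by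
  simp only [List.mem_filter, beq_iff_eq] at hy; exact hy.2

lemma insert_buckets (key : List String → Int) (x : List String) (l : List (List String))
    (hk : key x = 0 ∨ key x = 1 ∨ key x = 2 ∨ key x = 3 ∨ key x = 4) :
    PySem.List.insertBy (fun a b => decide (key a < key b)) x (pvBuckets key l)
      = pvBuckets key (l ++ [x]) := by
  have hf : ∀ (k : Int), (l ++ [x]).filter (fun z => key z == k)
      = l.filter (fun z => key z == k) ++ (if key x = k then [x] else []) := by
    intro k; rw [List.filter_append]
    by_cases h : key x = k <;> simp [h]
  rcases hk with h | h | h | h | h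
  · rw [show pvBuckets key l = (l.filter (fun z => key z == 0)) ++ (l.filter (fun z => key z == 1) ++ l.filter (fun z => key z == 2) ++ l.filter (fun z => key z == 3) ++ l.filter (fun z => key z == 4)) from by simp [pvBuckets, List.append_assoc]]
    rw [insert_split _ _ _ _ ?_ ?_]
    · simp [pvBuckets, hf, h, List.append_assoc]
    · intro y hy
      rw [List.mem_filter] at hy
      simp [key_of_mem_filter key l _ y (List.mem_filter.mpr hy), h]
    · intro y hy
      simp only [List.append_assoc, List.mem_append] at hy
      rcases hy with hy | hy | hy | hy <;> simp [key_of_mem_filter key l _ y hy, h]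
  · rw [show pvBuckets key l = (l.filter (fun z => key z == 0) ++ l.filter (fun z => key z == 1)) ++ (l.filter (fun z => key z == 2) ++ l.filter (fun z => key z == 3) ++ l.filter (fun z => key z == 4)) from by simp [pvBuckets, List.append_assoc]]
    rw [insert_split _ _ _ _ ?_ ?_]
    · simp [pvBuckets, hf, h, List.append_assoc]
    · intro y hy
      simp only [List.mem_append] at hy
      rcases hy with hy | hy <;> simp [key_of_mem_filter key l _ y hy, h]
    · intro y hy
      simp only [List.append_assoc, List.mem_append] at hy
      rcases hy with hy | hy | hy <;> simp [key_of_mem_filter key l _ y hy, h]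
  · rw [show pvBuckets key l = (l.filter (fun z => key z == 0) ++ l.filter (fun z => key z == 1) ++ l.filter (fun z => key z == 2)) ++ (l.filter (fun z => key z == 3) ++ l.filter (fun z => key z == 4)) from by simp [pvBuckets, List.append_assoc]]
    rw [insert_split _ _ _ _ ?_ ?_]
    · simp [pvBuckets, hf, h, List.append_assoc]
    · intro y hy
      simp only [List.append_assoc, List.mem_append] at hy
      rcases hy with hy | hy | hy <;> simp [key_of_mem_filter key l _ y hy, h]
    · intro y hy
      simp only [List.mem_append] at hy
      rcases hy with hy | hy <;> simp [key_of_mem_filter key l _ y hy, h]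
  · rw [show pvBuckets key l = (l.filter (fun z => key z == 0) ++ l.filter (fun z => key z == 1) ++ l.filter (fun z => key z == 2) ++ l.filter (fun z => key z == 3)) ++ (l.filter (fun z => key z == 4)) from by simp [pvBuckets, List.append_assoc]]
    rw [insert_split _ _ _ _ ?_ ?_]
    · simp [pvBuckets, hf, h, List.append_assoc]
    · intro y hy
      simp only [List.append_assoc, List.mem_append] at hy
      rcases hy with hy | hy | hy | hy <;> simp [key_of_mem_filter key l _ y hy, h]
    · intro y hy
      rw [List.mem_filter] at hy
      simp [key_of_mem_filter key l _ y (List.mem_filter.mpr hy), h]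
  · rw [show pvBuckets key l = (l.filter (fun z => key z == 0) ++ l.filter (fun z => key z == 1) ++ l.filter (fun z => key z == 2) ++ l.filter (fun z => key z == 3) ++ l.filter (fun z => key z == 4)) ++ (([] : List (List String))) from by simp [pvBuckets, List.append_assoc]]
    rw [insert_split _ _ _ _ ?_ ?_]
    · simp [pvBuckets, hf, h, List.append_assoc]
    · intro y hy
      simp only [List.append_assoc, List.mem_append] at hy
      rcases hy with hy | hy | hy | hy | hy <;> simp [key_of_mem_filter key l _ y hy, h]
    · intro y hy; simp at hy

lemma foldl_ins (key : List String → Int) (xs : List (List String))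
    (hk : ∀ x ∈ xs, key x = 0 ∨ key x = 1 ∨ key x = 2 ∨ key x = 3 ∨ key x = 4) :
    ∀ ys : List (List String),
      xs.foldl (fun acc x => PySem.List.insertBy (fun a b => decide (key a < key b)) x acc)
        (pvBuckets key ys) = pvBuckets key (ys ++ xs) := by
  induction xs with
  | nil => intro ys; simp
  | cons x xs ih =>
      intro ys
      simp only [List.foldl_cons]
      rw [insert_buckets key x ys (hk x (by simp)),
        ih (fun z hz => hk z (by simp [hz])) (ys ++ [x])]
      simp

lemma sorted_eq_buckets (key : List String → Int) (xs : List (List String))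
    (hk : ∀ x ∈ xs, key x = 0 ∨ key x = 1 ∨ key x = 2 ∨ key x = 3 ∨ key x = 4) :
    PySem.List.sorted xs key = pvBuckets key xs := by
  rw [PySem.List.sorted_eq_foldl_insertBy]
  have h0 : pvBuckets key ([] : List (List String)) = [] := by simp [pvBuckets]
  have := foldl_ins key xs hk []
  rw [h0] at this
  simpa using this

-- one step of A's loop, written with the priority key
lemma stepA_prio (vi : Int)
    (c : List (List String) × List (List String) × List (List String) × List (List String) × List (List String))
    (r : List String) :
    pvStepA vi c r
      = (c.1 ++ (if pvPrio vi r == 0 then [r] else []),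
         c.2.1 ++ (if pvPrio vi r == 1 then [r] else []),
         c.2.2.1 ++ (if pvPrio vi r == 2 then [r] else []),
         c.2.2.2.1 ++ (if pvPrio vi r == 3 then [r] else []),
         c.2.2.2.2 ++ (if pvPrio vi r == 4 then [r] else [])) := by
  simp only [pvStepA, pvPrio, pvName]
  split_ifs <;> simp_all

-- A's categorizing loop, from any starting buckets, appends the five priority-filters
lemma foldA (vi : Int) (xs : List (List String)) :
    ∀ d t a b o : List (List String),
      xs.foldl (pvStepA vi) (d, t, a, b, o)
        = (d ++ xs.filter (fun r => pvPrio vi r == 0),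
           t ++ xs.filter (fun r => pvPrio vi r == 1),
           a ++ xs.filter (fun r => pvPrio vi r == 2),
           b ++ xs.filter (fun r => pvPrio vi r == 3),
           o ++ xs.filter (fun r => pvPrio vi r == 4)) := by
  induction xs with
  | nil => intro d t a b o; simp
  | cons r xs ih =>
      intro d t a b o
      rw [List.foldl_cons, stepA_prio, ih]
      rcases pvPrio_range vi r with p | p | p | p | p <;>
        simp [p]

-- ===== VERDICT (by name: the statement is the Claim_ definition above) =====
theorem sort_by_categories_spec : Claim_equal_sort_by_categories := by
  intro df_list _ _
  unfold Spec_sort_by_categories sort_by_categories sort_by_categories_alt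
  set headers := (PySem.List.pyGet? df_list 0).getD [] with hh
  set rows := PySem.List.slice df_list (some 1) none with hr
  set vi : Int :=
    (((PySem.List.enumerate headers 0).find?
        (fun p => PySem.Str.isIn "variable" (PySem.Str.lower p.2))).map (·.1)).getD 0 with hv
  simp only [Prod.mk.injEq, true_and, and_true]
  rw [foldA vi rows [] [] [] [] []]
  rw [priorityB_eq vi]
  rw [sorted_eq_buckets (pvPrio vi) rows (fun x _ => pvPrio_range vi x)]
  simp [pvBuckets, List.append_assoc]
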